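-- pv_equiv track=rewrite | github.com/vinit-chauhan/workflows | workflow/tools.py | _extract_url_context_impl
-- ===== SOURCE A (Python) =====
-- def _extract_url_context_impl(markdown_content: str, url: str) -> dict[str, str]:
--     """
--     Internal implementation for extracting URL context.
--     Not decorated with @tool so it can be called directly.
--     """
--     try:
--         lines = markdown_content.split('\n')
--         url_line_idx = -1
--
--         # Find the line containing the URL
--         for idx, line in enumerate(lines):
--             if url in line:
--                 url_line_idx = idx
--                 break
--
--         if url_line_idx == -1:
--             return {
--                 "url": url,
--                 "section": "Unknown",
--                 "context": "URL not found in content"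
--             }
--
--         # Find the current section by looking backwards for the nearest heading
--         current_section = "Unknown"
--
--         for idx in range(url_line_idx, -1, -1):
--             line = lines[idx].strip()
--             if line.startswith('#'):
--                 # Found the section heading
--                 current_section = line.lstrip('#').strip()
--                 break
--
--         # Extract surrounding context (5 lines before and after)
--         context_start = max(0, url_line_idx - 5)
--         context_end = min(len(lines), url_line_idx + 6)
--         context = '\n'.join(lines[context_start:context_end])
--
--         # Determine section type
--         section_lower = current_section.lower()
--         section_type = "other"
--
--         if any(keyword in section_lower for keyword in ['intro', 'overview', 'about', 'service info', 'common use', 'compatibility']):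
--             section_type = "product_info"
--         elif any(keyword in section_lower for keyword in ['setup', 'configuration', 'install', 'set up', 'vendor set up', 'kibana set up']):
--             section_type = "setup"
--         elif any(keyword in section_lower for keyword in ['documentation', 'reference', 'resources', 'documentation sites']):
--             section_type = "documentation"
--         elif any(keyword in section_lower for keyword in ['troubleshoot', 'error', 'issue']):
--             section_type = "troubleshooting"
--
--         return {
--             "url": url,
--             "section": current_section,
--             "section_type": section_type,
--             "context": context
--         }
--
--     except (ValueError, IndexError, AttributeError) as e:
--         # Handle parsing errors
--         return {
--             "url": url,
--             "section": "Unknown",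
--             "section_type": "other",
--             "context": f"Error extracting context: {str(e)}"
--         }
-- ===== SOURCE B (Python) =====
-- _SECTION_TYPES = [
--     ("product_info", ['intro', 'overview', 'about', 'service info', 'common use', 'compatibility']),
--     ("setup", ['setup', 'configuration', 'install', 'set up', 'vendor set up', 'kibana set up']),
--     ("documentation", ['documentation', 'reference', 'resources', 'documentation sites']),
--     ("troubleshooting", ['troubleshoot', 'error', 'issue']),
-- ]
--
--
-- def _extract_url_context_impl(markdown_content: str, url: str) -> dict[str, str]:
--     lines = markdown_content.split('\n')
--
--     # Single forward pass: track the most recent heading, stop at the first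
--     # line containing the URL.  The heading is updated before the URL test so
--     # a URL sitting on a heading line gets that very heading as its section.
--     current_section = "Unknown"
--     url_line_idx = None
--     for idx, line in enumerate(lines):
--         stripped = line.strip()
--         if stripped.startswith('#'):
--             current_section = stripped.lstrip('#').strip()
--         if url in line:
--             url_line_idx = idx
--             break
--
--     if url_line_idx is None:
--         return {
--             "url": url,
--             "section": "Unknown",
--             "context": "URL not found in content"
--         }
--
--     context = '\n'.join(lines[max(0, url_line_idx - 5):url_line_idx + 6])
--
--     section_lower = current_section.lower()
--     section_type = next(
--         (name for name, keywords in _SECTION_TYPES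
--          if any(k in section_lower for k in keywords)),
--         "other")
--
--     return {
--         "url": url,
--         "section": current_section,
--         "section_type": section_type,
--         "context": context
--     }
-- ===== Notes on version B (the rewrite author's own statement) =====
-- stated objective: alternative
-- what changed: B replaces A's find-the-URL-line-then-rescan-backwards-for-the-heading with a single forward pass that maintains the running section heading (updated before the URL test) and replaces the if/elif keyword chain with a lookup in an ordered (type, keywords) table.
import Mathlib
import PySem

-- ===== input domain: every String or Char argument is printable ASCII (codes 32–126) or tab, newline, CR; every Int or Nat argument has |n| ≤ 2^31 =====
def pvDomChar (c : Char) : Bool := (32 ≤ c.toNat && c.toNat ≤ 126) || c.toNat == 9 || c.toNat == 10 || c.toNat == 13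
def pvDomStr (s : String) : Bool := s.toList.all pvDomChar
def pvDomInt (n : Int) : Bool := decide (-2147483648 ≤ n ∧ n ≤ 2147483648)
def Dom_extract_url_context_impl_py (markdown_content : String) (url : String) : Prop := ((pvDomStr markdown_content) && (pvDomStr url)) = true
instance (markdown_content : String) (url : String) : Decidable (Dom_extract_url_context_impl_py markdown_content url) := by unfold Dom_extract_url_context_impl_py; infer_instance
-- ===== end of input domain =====

-- B replaces A's find-then-backward-rescan with one forward pass that keeps the running
-- section heading, and the if/elif keyword chain with an ordered (type, keywords) table
-- (objective: alternative decomposition, same asymptotic cost).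

-- ===== PORT A =====

-- s.lstrip('#'): no PySem primitive takes a chars argument for lstrip; dropping the
-- leading '#' characters is exact for this single-character set.
def pyLstripHash (s : String) : String := String.ofList (s.toList.dropWhile (· == '#'))

-- "for idx, line in enumerate(lines): if url in line: url_line_idx = idx; break"
def aFindUrl (url : String) : List String → Nat → Option Nat
  | [], _ => none
  | l :: ls, i => if PySem.Str.isIn url l then some i else aFindUrl url ls (i + 1)

-- "for idx in range(url_line_idx, -1, -1): line = lines[idx].strip(); if line.startswith('#'): …; break"
def aBackScan (lines : List String) : Nat → String
  | 0 =>
    let line := PySem.Str.strip (lines.getD 0 "")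
    if PySem.Str.startswith line "#" then PySem.Str.strip (pyLstripHash line) else "Unknown"
  | j + 1 =>
    let line := PySem.Str.strip (lines.getD (j + 1) "")
    if PySem.Str.startswith line "#" then PySem.Str.strip (pyLstripHash line) else aBackScan lines j

-- the if/elif chain over "any(keyword in section_lower for keyword in [...])"
def aSectionType (current_section : String) : String :=
  let s := PySem.Str.lower current_section
  if (["intro", "overview", "about", "service info", "common use", "compatibility"]).any
      (fun k => PySem.Str.isIn k s) then "product_info"
  else if (["setup", "configuration", "install", "set up", "vendor set up", "kibana set up"]).any
      (fun k => PySem.Str.isIn k s) then "setup"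
  else if (["documentation", "reference", "resources", "documentation sites"]).any
      (fun k => PySem.Str.isIn k s) then "documentation"
  else if (["troubleshoot", "error", "issue"]).any
      (fun k => PySem.Str.isIn k s) then "troubleshooting"
  else "other"

-- the try/except arms of A are unreachable for str arguments (no listed exception can occur)
def extract_url_context_impl_py (markdown_content : String) (url : String) : List (String × String) :=
  let lines := (PySem.Str.split? markdown_content "\n").getD []
  match aFindUrl url lines 0 with
  | none => [("url", url), ("section", "Unknown"), ("context", "URL not found in content")]
  | some url_line_idx =>
    let current_section := aBackScan lines url_line_idx
    let context_start : Int := max 0 ((url_line_idx : Int) - 5)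
    let context_end : Int := min (lines.length : Int) ((url_line_idx : Int) + 6)
    let context := PySem.Str.join "\n" (PySem.List.slice lines (some context_start) (some context_end))
    let section_type := aSectionType current_section
    [("url", url), ("section", current_section), ("section_type", section_type), ("context", context)]

-- ===== PORT B =====

def bTable : List (String × List String) :=
  [("product_info", ["intro", "overview", "about", "service info", "common use", "compatibility"]),
   ("setup", ["setup", "configuration", "install", "set up", "vendor set up", "kibana set up"]),
   ("documentation", ["documentation", "reference", "resources", "documentation sites"]),
   ("troubleshooting", ["troubleshoot", "error", "issue"])]

-- the single forward loop: update the running section, then test URL membership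
def bScan (url : String) : List String → String → Nat → String × Option Nat
  | [], sec, _ => (sec, none)
  | l :: ls, sec, i =>
    let stripped := PySem.Str.strip l
    let sec' := if PySem.Str.startswith stripped "#" then PySem.Str.strip (pyLstripHash stripped) else sec
    if PySem.Str.isIn url l then (sec', some i) else bScan url ls sec' (i + 1)

def extract_url_context_impl_py_alt (markdown_content : String) (url : String) : List (String × String) :=
  let lines := (PySem.Str.split? markdown_content "\n").getD []
  match bScan url lines "Unknown" 0 with
  | (_, none) => [("url", url), ("section", "Unknown"), ("context", "URL not found in content")]
  | (current_section, some url_line_idx) =>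
    let context := PySem.Str.join "\n"
      (PySem.List.slice lines (some (max 0 ((url_line_idx : Int) - 5))) (some ((url_line_idx : Int) + 6)))
    let section_lower := PySem.Str.lower current_section
    let section_type :=
      ((bTable.find? (fun p => p.2.any (fun k => PySem.Str.isIn k section_lower))).map Prod.fst).getD "other"
    [("url", url), ("section", current_section), ("section_type", section_type), ("context", context)]

-- ===== PRECONDITION & SPEC =====
def Spec_extract_url_context_impl_py (markdown_content : String) (url : String) (out : List (String × String)) : Prop := out = extract_url_context_impl_py_alt markdown_content url
instance (markdown_content : String) (url : String) (out : List (String × String)) : Decidable (Spec_extract_url_context_impl_py markdown_content url out) := by unfold Spec_extract_url_context_impl_py; infer_instance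

-- ===== CLAIM (what is proved, stated in full; the proofs are below) =====
def Claim_equal_extract_url_context_impl_py : Prop := ∀ (markdown_content : String) (url : String), Dom_extract_url_context_impl_py markdown_content url → Spec_extract_url_context_impl_py markdown_content url (extract_url_context_impl_py markdown_content url)

-- ===== LEMMAS AND PROOFS =====

-- the heading-tracking step of B's loop
def secStep (sec l : String) : String :=
  let stripped := PySem.Str.strip l
  if PySem.Str.startswith stripped "#" then PySem.Str.strip (pyLstripHash stripped) else sec

-- first index (relative) whose line contains url
def natFind (url : String) : List String → Option Nat
  | [] => none
  | l :: ls => if PySem.Str.isIn url l then some 0 else (natFind url ls).map (· + 1)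

theorem aFindUrl_eq (url : String) (ls : List String) (i : Nat) :
    aFindUrl url ls i = (natFind url ls).map (i + ·) := by
  induction ls generalizing i with
  | nil => rfl
  | cons l ls ih =>
    simp only [aFindUrl, natFind]
    split
    · rfl
    · rw [ih]; cases natFind url ls <;> simp <;> omega

theorem natFind_lt (url : String) (ls : List String) (k : Nat) (h : natFind url ls = some k) :
    k < ls.length := by
  induction ls generalizing k with
  | nil => simp [natFind] at h
  | cons l ls ih =>
    simp only [natFind] at h
    split at h
    · cases h; simp
    · cases hk : natFind url ls with
      | none => rw [hk] at h; simp at h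
      | some k' => rw [hk] at h; simp at h; subst h; simpa using Nat.succ_lt_succ (ih k' hk)

theorem bScan_eq (url : String) (ls : List String) (sec : String) (i : Nat) :
    bScan url ls sec i =
      match natFind url ls with
      | none => ((ls.foldl secStep sec), none)
      | some k => ((ls.take (k + 1)).foldl secStep sec, some (i + k)) := by
  induction ls generalizing sec i with
  | nil => rfl
  | cons l ls ih =>
    simp only [bScan, natFind]
    by_cases hin : PySem.Chars.isIn url.toList l.toList = true
    · simp [hin, secStep]
    · rw [ih]
      cases hk : natFind url ls with
      | none => simp [hin, secStep]
      | some k =>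
        simp only [Option.map_some]
        simp [hin, secStep]
        omega

theorem aBackScan_eq (lines : List String) (j : Nat) (hj : j < lines.length) :
    aBackScan lines j = (lines.take (j + 1)).foldl secStep "Unknown" := by
  induction j with
  | zero =>
    have h0 : lines.getD 0 "" = lines[0]'hj := by
      simp [List.getD, List.getElem?_eq_getElem hj]
    rw [List.take_add_one]
    simp only [aBackScan, h0, List.take_zero, List.getElem?_eq_getElem hj]
    simp [secStep]
  | succ j ih =>
    have h0 : lines.getD (j + 1) "" = lines[j + 1]'hj := by
      simp [List.getD, List.getElem?_eq_getElem hj]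
    rw [List.take_add_one]
    simp only [aBackScan, h0, List.getElem?_eq_getElem hj]
    rw [List.foldl_append, ih (by omega)]
    simp [secStep]

theorem slice_min_stop {α : Type} (xs : List α) (a : Option Int) (b : Int) :
    PySem.List.slice xs a (some (min (xs.length : Int) b)) = PySem.List.slice xs a (some b) := by
  simp only [PySem.List.slice, PySem.List.clampIdx]
  congr 1
  split_ifs <;> omega

theorem sectionType_eq (sec : String) :
    aSectionType sec =
      ((bTable.find? (fun p => p.2.any (fun k => PySem.Str.isIn k (PySem.Str.lower sec)))).map Prod.fst).getD "other" := by
  unfold aSectionType bTable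
  simp only [List.find?]
  cases hc1 : (["intro", "overview", "about", "service info", "common use", "compatibility"] : List String).any (fun k => PySem.Str.isIn k (PySem.Str.lower sec)) <;>
  cases hc2 : (["setup", "configuration", "install", "set up", "vendor set up", "kibana set up"] : List String).any (fun k => PySem.Str.isIn k (PySem.Str.lower sec)) <;>
  cases hc3 : (["documentation", "reference", "resources", "documentation sites"] : List String).any (fun k => PySem.Str.isIn k (PySem.Str.lower sec)) <;>
  cases hc4 : (["troubleshoot", "error", "issue"] : List String).any (fun k => PySem.Str.isIn k (PySem.Str.lower sec)) <;>
  simp_all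

-- ===== VERDICT (by name: the statement is the Claim_ definition above) =====
theorem extract_url_context_impl_py_spec : Claim_equal_extract_url_context_impl_py := by
  intro md url _dom
  unfold Spec_extract_url_context_impl_py extract_url_context_impl_py extract_url_context_impl_py_alt
  simp only [bScan_eq, aFindUrl_eq]
  cases hk : natFind url ((PySem.Str.split? md "\n").getD []) with
  | none => simp only [Option.map_none]
  | some k =>
    simp only [Option.map_some, Nat.zero_add]
    rw [aBackScan_eq _ _ (natFind_lt _ _ _ hk), slice_min_stop, sectionType_eq]
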